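-- pv_equiv track=rewrite | github.com/bob686868/Leetcode-100-day-challenge- | day63.py | lc2147
-- ===== SOURCE A (Python) =====
-- def lc2147(corridor):
--         res=1
--         i=0
--         seats=0
--         totalSeats=0
--
--         while i<len(corridor):
--             if corridor[i]!="S":
--                 i+=1
--                 continue
--             seats+=1
--             totalSeats+=1
--             if seats!=2:
--                 i+=1
--                 continue
--             oldI=i
--             i+=1
--             while i<len(corridor) and corridor[i]!="S":
--                 i+=1
--             if i==len(corridor):break
--             res*=(i-oldI)
--             seats=0
--
--         return res % (10**9+7) if (totalSeats%2==0 and totalSeats) else 0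
-- ===== SOURCE B (Python) =====
-- def lc2147(corridor):
--     pos = [i for i, c in enumerate(corridor) if c == "S"]
--     if not pos or len(pos) % 2:
--         return 0
--     res = 1
--     take = False
--     for a, b in zip(pos, pos[1:]):
--         if take:
--             res *= b - a
--         take = not take
--     return res % (10 ** 9 + 7)
-- ===== Notes on version B (the rewrite author's own statement) =====
-- stated objective: simpler
-- what changed: Replaces A's interleaved char-index state machine (outer while with seat counter, inner skip-scan and break) by building the seat-position list once and folding over adjacent position pairs, multiplying every other gap.
import Mathlib
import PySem

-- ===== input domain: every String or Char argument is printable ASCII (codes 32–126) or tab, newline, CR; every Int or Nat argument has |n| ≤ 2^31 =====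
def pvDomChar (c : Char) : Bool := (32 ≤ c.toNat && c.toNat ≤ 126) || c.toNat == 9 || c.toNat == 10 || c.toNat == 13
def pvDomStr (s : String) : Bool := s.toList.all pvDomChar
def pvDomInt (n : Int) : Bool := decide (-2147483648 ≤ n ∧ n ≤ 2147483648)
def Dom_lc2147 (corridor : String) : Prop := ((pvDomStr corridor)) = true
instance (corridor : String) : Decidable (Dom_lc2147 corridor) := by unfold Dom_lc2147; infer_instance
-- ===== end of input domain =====

-- B builds the seat-position list once and pairs it with one fold; equivalence of the return value with A's state-machine scan.

-- ===== PORT A =====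
-- inner while: 'while i<len(corridor) and corridor[i]!="S": i+=1', returns final i
-- (fuel only makes the recursion structural; it never changes the computed value)
def lc2147_inner (cs : List Char) : Nat → Nat → Nat
  | 0, i => i
  | fuel + 1, i =>
    if h : i < cs.length then
      if cs[i] ≠ 'S' then lc2147_inner cs fuel (i + 1) else i
    else i

-- outer while loop; state (i, res, seats, totalSeats); returns (res, totalSeats)
def lc2147_outer (cs : List Char) : Nat → Nat → Int → Nat → Nat → Int × Nat
  | 0, _, res, _, total => (res, total)
  | fuel + 1, i, res, seats, total =>
    if h : i < cs.length then
      if cs[i] ≠ 'S' then lc2147_outer cs fuel (i + 1) res seats total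
      else
        let seats' := seats + 1
        let total' := total + 1
        if seats' ≠ 2 then lc2147_outer cs fuel (i + 1) res seats' total'
        else
          let i' := lc2147_inner cs cs.length (i + 1)
          if i' = cs.length then (res, total')          -- break
          else lc2147_outer cs fuel i' (res * ((i' : Int) - (i : Int))) 0 total'
    else (res, total)

def lc2147 (corridor : String) : Int :=
  let cs := corridor.toList
  let rt := lc2147_outer cs (cs.length + 1) 0 1 0 0
  if rt.2 % 2 = 0 ∧ rt.2 ≠ 0 then PySem.Int.mod rt.1 (10 ^ 9 + 7) else 0

-- ===== PORT B =====
def lc2147_alt (corridor : String) : Int :=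
  let pos : List Int := (PySem.List.enumerate corridor.toList 0).filterMap
    (fun ic => if ic.2 = 'S' then some ic.1 else none)
  if pos = [] ∨ pos.length % 2 = 1 then 0
  else
    let st := (pos.zip (PySem.List.slice pos (some 1) none)).foldl
      (fun (s : Int × Bool) ab => ((if s.2 then s.1 * (ab.2 - ab.1) else s.1), !s.2)) (1, false)
    PySem.Int.mod st.1 (10 ^ 9 + 7)

-- ===== PRECONDITION & SPEC =====
def Spec_lc2147 (corridor : String) (out : Int) : Prop := out = lc2147_alt corridor
instance (corridor : String) (out : Int) : Decidable (Spec_lc2147 corridor out) := by unfold Spec_lc2147; infer_instance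

-- ===== CLAIM (what is proved, stated in full; the proofs are below) =====
def Claim_equal_lc2147 : Prop := ∀ (corridor : String), Dom_lc2147 corridor → Spec_lc2147 corridor (lc2147 corridor)

-- ===== LEMMAS AND PROOFS =====

-- seat positions of cs at indices ≥ i, in increasing order
def pvPosFrom (cs : List Char) (i : Nat) : List Nat :=
  if h : i < cs.length then
    (if cs[i] = 'S' then [i] else []) ++ pvPosFrom cs (i + 1)
  else []
termination_by cs.length - i

-- the positions list built by B's comprehension, structurally
def pvEnumFilter : List Char → Nat → List Nat
  | [], _ => []
  | c :: l, s => (if c = 'S' then [s] else []) ++ pvEnumFilter l (s + 1)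

-- product of every other adjacent gap: the 2nd↦3rd, 4th↦5th, … differences
def pvPairs : List Int → Int
  | p :: q :: rest => (q - p) * pvPairs rest
  | _ => 1

def pvPairsN : List Nat → Int
  | p :: q :: rest => ((q : Int) - (p : Int)) * pvPairsN rest
  | _ => 1

-- A's outer loop replayed over the seat-position list (seats ∈ {0,1} between iterations)
def pvG : List Nat → Int → Nat → Nat → Int × Nat
  | [], res, _, t => (res, t)
  | _ :: ps, res, 0, t => pvG ps res 1 (t + 1)
  | p :: ps, res, _ + 1, t =>
    match ps with
    | [] => (res, t + 1)
    | q :: _ => pvG ps (res * ((q : Int) - (p : Int))) 0 (t + 1)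

theorem pvPosFrom_nil (cs : List Char) (i : Nat) (h : cs.length ≤ i) : pvPosFrom cs i = [] := by
  unfold pvPosFrom; rw [dif_neg (by omega)]

theorem pvPosFrom_mem (cs : List Char) (i : Nat) : ∀ x ∈ pvPosFrom cs i, i ≤ x ∧ x < cs.length := by
  intro x hx
  unfold pvPosFrom at hx
  split at hx
  · rcases List.mem_append.1 hx with h1 | h2
    · split at h1 <;> simp at h1
      omega
    · have := pvPosFrom_mem cs (i + 1) x h2
      omega
  · simp at hx
termination_by cs.length - i

theorem pvPosFrom_head (cs : List Char) (j q : Nat) (rest : List Nat)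
    (h : pvPosFrom cs j = q :: rest) : pvPosFrom cs q = q :: rest := by
  by_cases hj : j < cs.length
  · rw [pvPosFrom, dif_pos hj] at h
    by_cases hS : cs[j] = 'S'
    · rw [if_pos hS] at h
      simp only [List.singleton_append, List.cons.injEq] at h
      obtain ⟨h1, h2⟩ := h
      subst h1
      rw [pvPosFrom, dif_pos hj, if_pos hS, h2]
      rfl
    · rw [if_neg hS] at h
      simp at h
      exact pvPosFrom_head cs (j + 1) q rest h
  · rw [pvPosFrom_nil cs j (by omega)] at h; exact absurd h (by simp)
termination_by cs.length - j

theorem pvInner_eq (cs : List Char) (fuel : Nat) : ∀ (i : Nat), i ≤ cs.length → cs.length ≤ i + fuel →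
    lc2147_inner cs fuel i = ((pvPosFrom cs i).head?).getD cs.length := by
  induction fuel with
  | zero =>
    intro i hle hf
    have : i = cs.length := by omega
    rw [lc2147_inner, pvPosFrom_nil cs i (by omega)]
    simpa using this
  | succ fuel ih =>
    intro i hle hf
    by_cases h : i < cs.length
    · rw [lc2147_inner, dif_pos h, pvPosFrom, dif_pos h]
      by_cases hS : cs[i] = 'S'
      · simp [hS]
      · simp [hS]
        exact ih (i + 1) (by omega) (by omega)
    · have : i = cs.length := by omega
      rw [lc2147_inner, dif_neg h, pvPosFrom_nil cs i (by omega)]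
      simpa using this

theorem pvOuter_eq (cs : List Char) (fuel : Nat) : ∀ (i : Nat), cs.length < i + fuel →
    (∀ (res : Int) (total : Nat),
      lc2147_outer cs fuel i res 0 total = pvG (pvPosFrom cs i) res 0 total) ∧
    (∀ (res : Int) (total : Nat),
      lc2147_outer cs fuel i res 1 total = pvG (pvPosFrom cs i) res 1 total) := by
  induction fuel with
  | zero =>
    intro i hf
    rw [pvPosFrom_nil cs i (by omega)]
    exact ⟨fun res total => rfl, fun res total => rfl⟩
  | succ fuel ih =>
    intro i hf
    by_cases h : i < cs.length
    · by_cases hS : cs[i] = 'S'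
      · have hpos : pvPosFrom cs i = i :: pvPosFrom cs (i + 1) := by
          rw [pvPosFrom, dif_pos h, if_pos hS]; rfl
        constructor
        · intro res total
          rw [lc2147_outer]
          simp only [dif_pos h, hS, ne_eq, not_true_eq_false, if_false, hpos]
          exact (ih (i + 1) (by omega)).2 res (total + 1)
        · intro res total
          rw [lc2147_outer]
          simp only [dif_pos h, hS, ne_eq, not_true_eq_false, if_false, hpos]
          rcases hps : pvPosFrom cs (i + 1) with _ | ⟨q, rest⟩
          · have hi' : lc2147_inner cs cs.length (i + 1) = cs.length := by
              rw [pvInner_eq cs cs.length (i + 1) (by omega) (by omega), hps]; rfl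
            rw [if_pos hi']
            rfl
          · have hmem := pvPosFrom_mem cs (i + 1) q (by rw [hps]; simp)
            have hi' : lc2147_inner cs cs.length (i + 1) = q := by
              rw [pvInner_eq cs cs.length (i + 1) (by omega) (by omega), hps]; rfl
            rw [hi', if_neg (by omega)]
            rw [(ih q (by omega)).1 (res * ((q : Nat) - (i : Nat) : Int)) (total + 1),
              pvPosFrom_head cs (i + 1) q rest hps]
            rfl
      · have hpos : pvPosFrom cs i = pvPosFrom cs (i + 1) := by
          rw [pvPosFrom, dif_pos h, if_neg hS]; rfl
        constructor
        · intro res total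
          rw [lc2147_outer]
          simp only [dif_pos h, ne_eq, hS, not_false_eq_true, if_true, hpos]
          exact (ih (i + 1) (by omega)).1 res total
        · intro res total
          rw [lc2147_outer]
          simp only [dif_pos h, ne_eq, hS, not_false_eq_true, if_true, hpos]
          exact (ih (i + 1) (by omega)).2 res total
    · refine ⟨fun res total => ?_, fun res total => ?_⟩ <;>
        rw [lc2147_outer, dif_neg h, pvPosFrom_nil cs i (by omega)] <;> rfl

theorem pvG_spec (P : List Nat) :
    (∀ (res : Int) (t : Nat), pvG P res 0 t = (res * pvPairsN P.tail, t + P.length)) ∧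
    (∀ (res : Int) (t : Nat), pvG P res 1 t = (res * pvPairsN P, t + P.length)) := by
  induction P with
  | nil => exact ⟨fun res t => by simp [pvG, pvPairsN], fun res t => by simp [pvG, pvPairsN]⟩
  | cons p ps ih =>
    constructor
    · intro res t
      show pvG ps res 1 (t + 1) = _
      rw [ih.2 res (t + 1)]
      simp only [List.tail_cons, List.length_cons, Prod.mk.injEq, true_and]
      omega
    · intro res t
      cases ps with
      | nil => simp [pvG, pvPairsN]
      | cons q rest =>
        show pvG (q :: rest) (res * ((q : Int) - (p : Int))) 0 (t + 1) = _
        rw [ih.1 (res * ((q : Int) - (p : Int))) (t + 1)]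
        simp only [List.tail_cons, List.length_cons, Prod.mk.injEq]
        refine ⟨?_, by omega⟩
        show res * ((q : Int) - (p : Int)) * pvPairsN rest = res * pvPairsN (p :: q :: rest)
        show _ = res * (((q : Int) - (p : Int)) * pvPairsN rest)
        ring
  
theorem pvEnumFilter_eq (l : List Char) : ∀ (s : Nat),
    (PySem.List.enumerate l (s : Int)).filterMap
      (fun ic => if ic.2 = 'S' then some ic.1 else none) =
    (pvEnumFilter l s).map (fun n => Int.ofNat n) := by
  induction l with
  | nil => intro s; simp [PySem.List.enumerate_nil, pvEnumFilter]
  | cons c cl ih =>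
    intro s
    rw [PySem.List.enumerate_cons, pvEnumFilter]
    by_cases hc : c = 'S'
    · simp only [List.filterMap_cons, hc]
      have : ((s : Int) + 1) = ((s + 1 : Nat) : Int) := by push_cast; ring
      rw [this, ih (s + 1)]
      simp
    · simp only [List.filterMap_cons, hc]
      have : ((s : Int) + 1) = ((s + 1 : Nat) : Int) := by push_cast; ring
      rw [this, ih (s + 1)]
      simp

theorem pvPosFrom_eq_enumFilter (cs : List Char) (i : Nat) :
    pvPosFrom cs i = pvEnumFilter (cs.drop i) i := by
  by_cases h : i < cs.length
  · rw [pvPosFrom, dif_pos h, List.drop_eq_getElem_cons h, pvEnumFilter,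
      pvPosFrom_eq_enumFilter cs (i + 1)]
  · rw [pvPosFrom_nil cs i (by omega), List.drop_eq_nil_of_le (by omega)]
    rfl
termination_by cs.length - i

theorem pvPairs_map (l : List Nat) : pvPairs (l.map (fun n => Int.ofNat n)) = pvPairsN l := by
  match l with
  | [] => rfl
  | [p] => rfl
  | p :: q :: rest =>
    simp only [List.map_cons, pvPairs, pvPairsN]
    rw [pvPairs_map rest]
    simp [Int.ofNat_eq_natCast]

-- B's fold over adjacent pairs computes the every-other-gap product
theorem pvFoldB (P : List Int) :
    (∀ res : Int, ((P.zip P.tail).foldl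
      (fun (s : Int × Bool) ab => ((if s.2 then s.1 * (ab.2 - ab.1) else s.1), !s.2))
      (res, false)).1 = res * pvPairs P.tail) ∧
    (∀ res : Int, ((P.zip P.tail).foldl
      (fun (s : Int × Bool) ab => ((if s.2 then s.1 * (ab.2 - ab.1) else s.1), !s.2))
      (res, true)).1 = res * pvPairs P) := by
  induction P with
  | nil => exact ⟨fun res => by simp [pvPairs], fun res => by simp [pvPairs]⟩
  | cons a tl ih =>
    cases tl with
    | nil => exact ⟨fun res => by simp [pvPairs], fun res => by simp [pvPairs]⟩
    | cons b rest =>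
      constructor
      · intro res
        show (((b :: rest).zip (b :: rest).tail).foldl _ (res, true)).1 = _
        rw [ih.2 res, List.tail_cons]
      · intro res
        show (((b :: rest).zip (b :: rest).tail).foldl _ (res * (b - a), false)).1 = _
        rw [ih.1 (res * (b - a))]
        show res * (b - a) * pvPairs rest = res * ((b - a) * pvPairs rest)
        ring


-- ===== VERDICT (by name: the statement is the Claim_ definition above) =====
theorem lc2147_spec : Claim_equal_lc2147 := by
  intro corridor _hdom
  unfold Spec_lc2147 lc2147 lc2147_alt
  have hpos : (PySem.List.enumerate corridor.toList (0 : Int)).filterMap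
      (fun ic => if ic.2 = 'S' then some ic.1 else none)
      = (pvPosFrom corridor.toList 0).map (fun n => Int.ofNat n) := by
    rw [pvPosFrom_eq_enumFilter corridor.toList 0, List.drop_zero]
    simpa using pvEnumFilter_eq corridor.toList 0
  have hA : lc2147_outer corridor.toList (corridor.toList.length + 1) 0 1 0 0
      = (pvPairsN (pvPosFrom corridor.toList 0).tail, (pvPosFrom corridor.toList 0).length) := by
    rw [(pvOuter_eq corridor.toList (corridor.toList.length + 1) 0 (by omega)).1 1 0,
      (pvG_spec (pvPosFrom corridor.toList 0)).1 1 0]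
    simp
  simp only [hA, hpos, PySem.List.slice_from_one]
  have hfold := (pvFoldB ((pvPosFrom corridor.toList 0).map (fun n => Int.ofNat n))).1 1
  set P := pvPosFrom corridor.toList 0 with hP
  by_cases hc : P = [] ∨ P.length % 2 = 1
  · have h1 : ¬(P.length % 2 = 0 ∧ P.length ≠ 0) := by
      rcases hc with hc | hc
      · simp [hc]
      · omega
    have h2 : P.map (fun n => Int.ofNat n) = [] ∨ (P.map (fun n => Int.ofNat n)).length % 2 = 1 := by
      rcases hc with hc | hc
      · exact Or.inl (by simp [hc])
      · exact Or.inr (by simpa using hc)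
    rw [if_neg h1, if_pos h2]
  · have h1 : P.length % 2 = 0 ∧ P.length ≠ 0 := by
      push Not at hc
      refine ⟨by omega, ?_⟩
      intro h0
      exact hc.1 (List.eq_nil_of_length_eq_zero h0)
    have h2 : ¬(P.map (fun n => Int.ofNat n) = [] ∨ (P.map (fun n => Int.ofNat n)).length % 2 = 1) := by
      push Not at hc ⊢
      exact ⟨by simpa using hc.1, by simpa using hc.2⟩
    rw [if_pos h1, if_neg h2]
    have htail : ((P.map (fun n => Int.ofNat n)).tail) = P.tail.map (fun n => Int.ofNat n) := by
      cases P <;> simp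
    rw [hfold, htail, pvPairs_map, one_mul]
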